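-- pv_equiv track=rewrite | github.com/najib105q/AdventOfCode | 2025/src/day10/part02.py | parse_machine
-- ===== SOURCE A (Python) =====
-- from typing import List, Tuple
--
-- def parse_machine(line: str) -> Tuple[List[List[int]], List[int]]:
--     buttons = []
--     i = 0
--     n = len(line)
--     while i < n:
--         if line[i] == '(':
--             j = i + 1
--             while j < n and line[j] != ')':
--                 j += 1
--             inside = line[i+1:j].strip()
--             if inside:
--                 buttons.append(list(map(int, inside.split(','))))
--             i = j + 1
--         else:
--             i += 1
--     l = line.find('{')
--     r = line.find('}', l + 1)
--     target = list(map(int, line[l+1:r].split(',')))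
--     return buttons, target
-- ===== SOURCE B (Python) =====
-- from typing import List, Tuple
--
-- def parse_machine(line: str) -> Tuple[List[List[int]], List[int]]:
--     buttons = []
--     for part in line.split('(')[1:]:
--         inside = part.split(')')[0].strip()
--         if inside:
--             buttons.append([int(x) for x in inside.split(',')])
--     l = line.find('{')
--     r = line.find('}', l + 1)
--     return buttons, [int(x) for x in line[l + 1:r].split(',')]
-- ===== Notes on version B (the rewrite author's own statement) =====
-- stated objective: idiomatic
-- what changed: Replaces A's manual index-walking scanner, an outer position loop with an inner loop hunting each closing paren, by split-driven parsing: iterate over the pieces obtained by splitting the line on opening parens, take each piece up to its first closing paren and parse its comma-separated ints; the brace target is extracted with the same find/slice step as A.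
import Mathlib
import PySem

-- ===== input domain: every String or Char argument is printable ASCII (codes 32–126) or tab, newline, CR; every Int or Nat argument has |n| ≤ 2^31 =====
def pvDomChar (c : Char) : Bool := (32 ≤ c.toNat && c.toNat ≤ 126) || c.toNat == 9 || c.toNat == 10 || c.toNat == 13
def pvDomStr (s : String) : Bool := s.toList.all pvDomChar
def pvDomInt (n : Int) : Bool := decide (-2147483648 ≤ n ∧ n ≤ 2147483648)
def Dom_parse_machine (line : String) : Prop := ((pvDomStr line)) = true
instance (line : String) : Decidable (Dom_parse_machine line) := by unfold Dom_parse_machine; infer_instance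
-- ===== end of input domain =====

-- ===== PORT A =====
-- B restructures only the button scanning, split-driven instead of index-walking; the target extraction is the same find/slice code in both.

-- inner while loop of A: advance j while j < n and line[j] != ')'
def pvFindClose (s : List Char) (n : Int) (j : Int) : Int :=
  if h : j < n ∧ PySem.List.pyGet? s j ≠ some ')' then pvFindClose s n (j + 1) else j
termination_by (n - j).toNat
decreasing_by omega

-- needed by pvLoopA's termination proof
theorem le_pvFindClose (s : List Char) (n j : Int) : j ≤ pvFindClose s n j := by
  unfold pvFindClose
  split
  · have := le_pvFindClose s n (j + 1); omega
  · omega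
termination_by (n - j).toNat
decreasing_by omega

-- outer while loop of A
def pvLoopA (s : List Char) (n : Int) (buttons : List (List Int)) (i : Int) : List (List Int) :=
  if h : i < n then
    if PySem.List.pyGet? s i = some '(' then
      let j := pvFindClose s n (i + 1)
      let inside := PySem.Chars.strip (PySem.List.slice s (some (i + 1)) (some j))
      let buttons' :=
        if inside ≠ [] then
          buttons ++ [(PySem.Chars.splitOn inside [',']).map (fun t => (PySem.Int.ofChars? t).getD 0)]
        else buttons
      pvLoopA s n buttons' (j + 1)
    else pvLoopA s n buttons (i + 1)
  else buttons
termination_by (n - i).toNat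
decreasing_by
  · have := le_pvFindClose s n (i + 1); omega
  · omega

-- int(tok): Pre_ guarantees ofChars? succeeds; .getD 0 is never the raising case inside Pre_
def parse_machine (line : String) : List (List Int) × List Int :=
  let s := line.toList
  let n : Int := PySem.Chars.len s
  let buttons := pvLoopA s n [] 0
  let l := PySem.Chars.find s ['{']
  let r := PySem.Chars.findFrom s ['}'] (l + 1) none
  let target := (PySem.Chars.splitOn (PySem.List.slice s (some (l + 1)) (some r)) [',']).map
      (fun t => (PySem.Int.ofChars? t).getD 0)
  (buttons, target)

-- ===== PORT B =====

-- body of B's for-loop: part.split(')')[0].strip(); append parsed ints if non-empty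
def pvStepB (acc : List (List Int)) (part : List Char) : List (List Int) :=
  let inside := PySem.Chars.strip ((PySem.Chars.splitOn part [')']).headI)
  if inside ≠ [] then
    acc ++ [(PySem.Chars.splitOn inside [',']).map (fun t => (PySem.Int.ofChars? t).getD 0)]
  else acc

def parse_machine_alt (line : String) : List (List Int) × List Int :=
  let s := line.toList
  let buttons := ((PySem.Chars.splitOn s ['(']).tail).foldl pvStepB []   -- B's [1:] is .tail
  let l := PySem.Chars.find s ['{']
  let r := PySem.Chars.findFrom s ['}'] (l + 1) none
  let target := (PySem.Chars.splitOn (PySem.List.slice s (some (l + 1)) (some r)) [',']).map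
      (fun t => (PySem.Int.ofChars? t).getD 0)
  (buttons, target)

-- ===== PRECONDITION & SPEC =====

-- the '(...)' group contents exactly as A scans them: at each '(', the characters up to the next ')' (or the end)
-- structural (fuel = length) so that `decide` can evaluate Pre_
def pvGroupsGo : Nat → List Char → List (List Char)
  | 0, _ => []
  | _ + 1, [] => []
  | f + 1, c :: rest =>
    if c = '(' then
      (rest.takeWhile (· != ')')) :: pvGroupsGo f ((rest.dropWhile (· != ')')).tail)
    else pvGroupsGo f rest

def pvGroupsOf (s : List Char) : List (List Char) := pvGroupsGo s.length s

def pvGroupOk (g : List Char) : Bool :=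
  !(g.contains '(') &&
    (PySem.Chars.strip g == [] ||
      (PySem.Chars.splitOn (PySem.Chars.strip g) [',']).all (fun t => (PySem.Int.ofChars? t).isSome))

-- Pre_ excludes exactly the lines on which A raises ValueError: some int() call on a button-group
-- token or on a target token fails (an opening paren inside a group content always makes its token unparseable).
def Pre_parse_machine (line : String) : Prop :=
  ((pvGroupsOf line.toList).all pvGroupOk = true) ∧
  ((PySem.Chars.splitOn
      (PySem.List.slice line.toList
        (some (PySem.Chars.find line.toList ['{'] + 1))
        (some (PySem.Chars.findFrom line.toList ['}'] (PySem.Chars.find line.toList ['{'] + 1) none)))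
      [',']).all (fun t => (PySem.Int.ofChars? t).isSome) = true)

instance (line : String) : Decidable (Pre_parse_machine line) := by
  unfold Pre_parse_machine; infer_instance

def pvWitness_parse_machine : String := "(1,2) (3,4) {5,6}"

def Spec_parse_machine (line : String) (out : List (List Int) × List Int) : Prop := out = parse_machine_alt line
instance (line : String) (out : List (List Int) × List Int) : Decidable (Spec_parse_machine line out) := by unfold Spec_parse_machine; infer_instance

-- ===== CLAIM (what is proved, stated in full; the proofs are below) =====
def Claim_equal_parse_machine : Prop := ∀ (line : String), Dom_parse_machine line → Pre_parse_machine line → Spec_parse_machine line (parse_machine line)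

-- ===== LEMMAS AND PROOFS =====

-- structural characterisation of Python's str.split(sep) for a one-character sep
def pvSplitC (c : Char) : List Char → List (List Char)
  | [] => [[]]
  | x :: r => if x = c then [] :: pvSplitC c r
              else (x :: (pvSplitC c r).headI) :: (pvSplitC c r).tail

theorem pvSplitC_ne_nil (c : Char) (s : List Char) : pvSplitC c s ≠ [] := by
  cases s with
  | nil => simp [pvSplitC]
  | cons x r => unfold pvSplitC; split <;> simp

theorem pvHeadI_cons_tail {α : Type} [Inhabited α] (l : List α) (h : l ≠ []) : l.headI :: l.tail = l := by
  cases l with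
  | nil => simp at h
  | cons a t => rfl

theorem pvGo_spec (c : Char) : ∀ (fuel : Nat) (s cur : List Char) (acc : List (List Char)),
    s.length < fuel →
    PySem.Chars.splitOn.go [c] fuel s cur acc =
      acc.reverse ++ ((cur.reverse ++ (pvSplitC c s).headI) :: (pvSplitC c s).tail) := by
  intro fuel
  induction fuel with
  | zero => intro s cur acc h; omega
  | succ f ih =>
    intro s cur acc h
    cases s with
    | nil =>
      simp [PySem.Chars.splitOn.go, pvSplitC]
    | cons x rest =>
      rw [PySem.Chars.splitOn.go]
      by_cases hx : x = c
      · subst hx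
        have hpre : List.isPrefixOf [x] (x :: rest) = true := by simp [List.isPrefixOf]
        simp only [hpre, if_pos, List.length_cons, List.length_nil, List.drop_succ_cons, List.drop_zero]
        rw [ih rest [] (cur.reverse :: acc) (by simpa using Nat.lt_of_succ_lt_succ (by simpa using h))]
        simp [pvSplitC, pvHeadI_cons_tail _ (pvSplitC_ne_nil x rest)]
      · have hpre : List.isPrefixOf [c] (x :: rest) = false := by
          simp [List.isPrefixOf]; exact fun hc => absurd hc.symm hx
        simp only [hpre]
        rw [ih rest (x :: cur) acc (by simpa using Nat.lt_of_succ_lt_succ (by simpa using h))]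
        simp [pvSplitC, hx]

theorem pvSplitOn_eq (c : Char) (s : List Char) : PySem.Chars.splitOn s [c] = pvSplitC c s := by
  unfold PySem.Chars.splitOn
  rw [pvGo_spec c (s.length + 1) s [] [] (by omega)]
  simp [pvHeadI_cons_tail _ (pvSplitC_ne_nil c s)]

theorem pvSplitC_headI (c : Char) (s : List Char) :
    (pvSplitC c s).headI = s.takeWhile (· != c) := by
  induction s with
  | nil => simp [pvSplitC]
  | cons x r ih =>
    unfold pvSplitC
    by_cases hx : x = c
    · simp [hx, List.takeWhile]
    · simp [hx, List.takeWhile, ih, show (x != c) = true by simp [hx]]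

theorem pvSplitC_append_no_c (c : Char) (w r : List Char) (hw : c ∉ w) :
    pvSplitC c (w ++ r) = (w ++ (pvSplitC c r).headI) :: (pvSplitC c r).tail := by
  induction w with
  | nil => simp [pvHeadI_cons_tail _ (pvSplitC_ne_nil c r)]
  | cons x t ih =>
    have hx : x ≠ c := fun h => hw (by simp [h])
    have ht : c ∉ t := fun h => hw (List.mem_cons_of_mem _ h)
    simp only [List.cons_append]
    conv_lhs => unfold pvSplitC
    simp [hx, ih ht]

theorem pvSplitC_no_c (c : Char) (w : List Char) (h : c ∉ w) : pvSplitC c w = [w] := by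
  have := pvSplitC_append_no_c c w [] h
  simpa [pvSplitC] using this

theorem pvFindClose_spec (s : List Char) : ∀ (k m : Nat), s.length - m ≤ k → m ≤ s.length →
    pvFindClose s (s.length : Int) (m : Int) =
      (m : Int) + (((s.drop m).takeWhile (· != ')')).length : Int) := by
  intro k
  induction k with
  | zero =>
    intro m hk hm
    have : m = s.length := by omega
    subst this
    rw [pvFindClose]
    simp
  | succ k ih =>
    intro m hk hm
    rcases Nat.eq_or_lt_of_le hm with he | hlt
    · subst he
      rw [pvFindClose]
      simp
    · have hget : PySem.List.pyGet? s (m : Int) = some s[m] := by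
        simp [PySem.List.pyGet?_natCast, List.getElem?_eq_getElem hlt]
      have hdrop : s.drop m = s[m] :: s.drop (m + 1) := (List.getElem_cons_drop hlt).symm
      by_cases hc : s[m] = ')'
      · rw [pvFindClose]
        have : ¬ ((m : Int) < (s.length : Int) ∧ PySem.List.pyGet? s (m : Int) ≠ some ')') := by
          simp [hget, hc]
        rw [dif_neg this]
        rw [hdrop]
        simp [List.takeWhile, hc]
      · rw [pvFindClose]
        have hcond : ((m : Int) < (s.length : Int) ∧ PySem.List.pyGet? s (m : Int) ≠ some ')') := by
          constructor
          · exact_mod_cast hlt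
          · simp [hget, hc]
        rw [dif_pos hcond]
        have : ((m : Int) + 1) = ((m + 1 : Nat) : Int) := by push_cast; ring
        rw [this, ih (m + 1) (by omega) (by omega)]
        rw [hdrop]
        simp [List.takeWhile, show (s[m] != ')') = true by simp [hc]]
        ring

theorem pvTakeWhile_all {p : Char → Bool} (w : List Char) (hw : ∀ x ∈ w, p x) :
    w.takeWhile p = w := List.takeWhile_eq_self_iff.mpr hw

theorem pvTakeWhile_append_stop {p : Char → Bool} (w u : List Char) (y : Char)
    (hw : ∀ x ∈ w, p x) (hy : ¬ p y) : (w ++ y :: u).takeWhile p = w := by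
  simp [List.takeWhile_append, pvTakeWhile_all w hw, hy]

theorem pvDropWhile_head_false (p : Char → Bool) (t r' : List Char) (y : Char)
    (h : List.dropWhile p t = y :: r') : p y = false := by
  induction t with
  | nil => simp at h
  | cons a u ih =>
    rw [List.dropWhile_cons] at h
    by_cases hp : p a
    · exact ih (by simpa [hp] using h)
    · simp [hp] at h
      rcases h with ⟨h1, _⟩
      subst h1
      simpa using hp

theorem pvDropWhile_nil_all (p : Char → Bool) (t : List Char)
    (h : List.dropWhile p t = []) : ∀ x ∈ t, p x := by
  induction t with
  | nil => simp
  | cons a u ih =>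
    rw [List.dropWhile_cons] at h
    by_cases hp : p a
    · intro x hx
      rcases List.mem_cons.mp hx with rfl | hx
      · exact hp
      · exact ih (by simpa [hp] using h) x hx
    · simp [hp] at h

theorem pvGroupsGo_congr : ∀ (f g : Nat) (s : List Char), s.length ≤ f → s.length ≤ g →
    pvGroupsGo f s = pvGroupsGo g s := by
  intro f
  induction f with
  | zero =>
    intro g s hf _
    have : s = [] := List.eq_nil_of_length_eq_zero (by omega)
    subst this
    cases g <;> simp [pvGroupsGo]
  | succ f ih =>
    intro g s hf hg
    cases s with
    | nil => cases g <;> simp [pvGroupsGo]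
    | cons c rest =>
      cases g with
      | zero => simp at hg
      | succ g =>
        simp only [List.length_cons] at hf hg
        simp only [pvGroupsGo]
        by_cases hc : c = '('
        · simp only [hc, if_true]
          congr 1
          have h1 := List.length_dropWhile_le (fun x => x != ')') rest
          have h2 : ((rest.dropWhile (· != ')')).tail).length
              = (rest.dropWhile (· != ')')).length - 1 := List.length_tail
          exact ih g ((rest.dropWhile (· != ')')).tail) (by omega) (by omega)
        · simp only [if_neg hc]
          exact ih g rest (by omega) (by omega)

theorem pvGroupsOf_cons_other (x : Char) (t : List Char) (hx : x ≠ '(') :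
    pvGroupsOf (x :: t) = pvGroupsOf t := by
  unfold pvGroupsOf
  simp only [List.length_cons, pvGroupsGo, if_neg hx]

theorem pvGroupsOf_cons_paren (t : List Char) :
    pvGroupsOf ('(' :: t)
      = (t.takeWhile (· != ')')) :: pvGroupsOf ((t.dropWhile (· != ')')).tail) := by
  unfold pvGroupsOf
  simp only [List.length_cons, pvGroupsGo, if_true]
  congr 1
  have h1 := List.length_dropWhile_le (fun x => x != ')') t
  have h2 : ((t.dropWhile (· != ')')).tail).length
      = (t.dropWhile (· != ')')).length - 1 := List.length_tail
  exact pvGroupsGo_congr t.length ((t.dropWhile (· != ')')).tail).length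
    ((t.dropWhile (· != ')')).tail) (by omega) (by omega)

theorem pvLoopA_spec (s : List Char) : ∀ (k m : Nat) (buttons : List (List Int)),
    s.length - m ≤ k → m ≤ s.length →
    (∀ g ∈ pvGroupsOf (s.drop m), '(' ∉ g) →
    pvLoopA s (s.length : Int) buttons (m : Int) =
      ((pvSplitC '(' (s.drop m)).tail).foldl pvStepB buttons := by
  intro k
  induction k with
  | zero =>
    intro m buttons hk hm hg
    have : m = s.length := by omega
    subst this
    rw [pvLoopA]
    simp [pvSplitC]
  | succ k ih =>
    intro m buttons hk hm hg
    rcases Nat.eq_or_lt_of_le hm with he | hlt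
    · subst he
      rw [pvLoopA]
      simp [pvSplitC]
    · have hget : PySem.List.pyGet? s (m : Int) = some s[m] := by
        simp [PySem.List.pyGet?_natCast, List.getElem?_eq_getElem hlt]
      have hdrop : s.drop m = s[m] :: s.drop (m + 1) := (List.getElem_cons_drop hlt).symm
      rw [pvLoopA, dif_pos (by exact_mod_cast hlt)]
      by_cases hc : s[m] = '('
      · rw [if_pos (by rw [hget, hc])]
        dsimp only
        -- the '(' case
        set t := s.drop (m + 1) with ht
        set w := t.takeWhile (· != ')') with hwdef
        have hwmem : ∀ x ∈ w, (x != ')') = true := fun x hx => List.mem_takeWhile_imp (p := (· != ')')) (l := t) hx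
        have hwnp : ')' ∉ w := by
          intro hmem; have := hwmem _ hmem; simp at this
        -- groups of the suffix
        have hgroups : pvGroupsOf (s.drop m) = w :: pvGroupsOf ((t.dropWhile (· != ')')).tail) := by
          rw [hdrop, hc, pvGroupsOf_cons_paren, ← hwdef]
        have hgw : '(' ∉ w := by
          have := hg w (by rw [hgroups]; exact List.mem_cons_self)
          exact this
        have hgrest : ∀ g ∈ pvGroupsOf ((t.dropWhile (· != ')')).tail), '(' ∉ g := by
          intro g hgmem
          exact hg g (by rw [hgroups]; exact List.mem_cons_of_mem _ hgmem)
        -- findClose value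
        have hcast : (m : Int) + 1 = ((m + 1 : Nat) : Int) := by push_cast; ring
        have hj : pvFindClose s (s.length : Int) ((m : Int) + 1)
            = ((m + 1 : Nat) : Int) + (w.length : Int) := by
          rw [hcast, pvFindClose_spec s s.length (m + 1) (by omega) (by omega)]
        -- the slice is w
        have hslice : PySem.List.slice s (some ((m : Int) + 1))
            (some (pvFindClose s (s.length : Int) ((m : Int) + 1))) = w := by
          rw [hj, hcast, PySem.List.slice_natCast_add]
          rw [← ht, hwdef]
          exact (List.prefix_iff_eq_take.mp (List.takeWhile_prefix _)).symm
        rw [hslice]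
        -- decompose t = w ++ rest
        have hsplit_t : w ++ t.dropWhile (· != ')') = t := List.takeWhile_append_dropWhile
        -- case on rest
        rcases hrest : t.dropWhile (· != ')') with _ | ⟨y, r'⟩
        · -- no ')' after the '(': the group runs to the end
          have hwt : w = t := by
            rw [hwdef]
            exact List.takeWhile_eq_self_iff.mpr (pvDropWhile_nil_all _ t hrest)
          have hlen_t : t.length = s.length - (m + 1) := by rw [ht]; simp
          have hend : ((m + 1 : Nat) : Int) + (w.length : Int) + 1 = (s.length : Int) + 1 := by
            rw [hwt]; push_cast; omega
          rw [hj, hend, pvLoopA, dif_neg (by omega)]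
          rw [hdrop, hc]
          rw [show pvSplitC '(' ('(' :: t) = [] :: pvSplitC '(' t from by rw [pvSplitC]; simp]
          simp only [List.tail_cons]
          rw [← hwt, pvSplitC_no_c '(' w hgw]
          simp only [List.foldl_cons, List.foldl_nil]
          rw [pvStepB]
          simp only [pvSplitOn_eq, pvSplitC_headI, pvTakeWhile_all w hwmem]
        · -- found the ')'
          have hy : y = ')' := by
            have := pvDropWhile_head_false (· != ')') t r' y hrest
            simpa using this
          subst hy
          have hm' : m + 1 + w.length + 1 ≤ s.length := by
            have h1 : t.length = s.length - (m + 1) := by rw [ht]; simp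
            have hlt' : w.length + 1 ≤ t.length := by
              rw [← hsplit_t, hrest]; simp
            omega
          have hdrop' : s.drop (m + 1 + w.length + 1) = r' := by
            have h2 : s.drop (m + 1 + w.length + 1) = t.drop (w.length + 1) := by
              rw [ht, List.drop_drop]; ring_nf
            rw [h2, ← hsplit_t, hrest]
            simp
          have hend : pvFindClose s (s.length : Int) ((m : Int) + 1) + 1
              = ((m + 1 + w.length + 1 : Nat) : Int) := by rw [hj]; push_cast; ring
          rw [hend, ih (m + 1 + w.length + 1) _ (by omega) hm'
            (by rw [hdrop']; intro g hgm; exact hgrest g (by rw [hrest]; simpa using hgm))]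
          rw [hdrop, hc, hdrop']
          rw [show pvSplitC '(' ('(' :: t) = [] :: pvSplitC '(' t from by rw [pvSplitC]; simp]
          simp only [List.tail_cons]
          rw [show t = w ++ (')' :: r') from by rw [← hsplit_t, hrest]]
          rw [pvSplitC_append_no_c '(' w (')' :: r') hgw]
          rw [show pvSplitC '(' (')' :: r')
              = (')' :: (pvSplitC '(' r').headI) :: (pvSplitC '(' r').tail from by
            rw [pvSplitC]; simp]
          simp only [List.headI, List.tail, List.foldl_cons]
          congr 1
          rw [pvStepB]
          simp only [pvSplitOn_eq, pvSplitC_headI]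
          rw [pvTakeWhile_append_stop w _ ')' hwmem (by simp)]
      · rw [if_neg (by rw [hget]; simp [hc])]
        have hcast : (m : Int) + 1 = ((m + 1 : Nat) : Int) := by push_cast; ring
        have hgrest : ∀ g ∈ pvGroupsOf (s.drop (m + 1)), '(' ∉ g := by
          intro g hgm
          apply hg
          rw [hdrop, pvGroupsOf_cons_other _ _ hc]
          exact hgm
        rw [hcast, ih (m + 1) buttons (by omega) (by omega) hgrest]
        rw [hdrop]
        rw [show pvSplitC '(' (s[m] :: s.drop (m + 1))
            = (s[m] :: (pvSplitC '(' (s.drop (m + 1))).headI) :: (pvSplitC '(' (s.drop (m + 1))).tail from by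
          rw [pvSplitC]; simp [hc]]
        simp

theorem pvPre_no_paren (line : String) (h : Pre_parse_machine line) :
    ∀ g ∈ pvGroupsOf line.toList, '(' ∉ g := by
  intro g hgmem
  have := (List.all_eq_true.mp h.1) g hgmem
  simp [pvGroupOk] at this
  exact this.1

-- ===== VERDICT (by name: the statement is the Claim_ definition above) =====
theorem parse_machine_spec : Claim_equal_parse_machine := by
  intro line _hd hpre
  unfold Spec_parse_machine parse_machine parse_machine_alt
  dsimp only
  have hlen : PySem.Chars.len line.toList = (line.toList.length : Int) := by
    simp [PySem.Chars.len_eq]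
  rw [hlen]
  rw [show ((0 : Int)) = ((0 : Nat) : Int) from rfl]
  rw [pvLoopA_spec line.toList line.toList.length 0 [] (by omega) (by omega)
    (by simpa using pvPre_no_paren line hpre)]
  rw [pvSplitOn_eq '(' line.toList]
  simp
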